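-- pv_equiv track=rewrite | github.com/MikkelHebel/Learning | Sorting Algorithms/Thanos_Sort.py | thanos_sort
-- ===== SOURCE A (Python) =====
-- def thanos_sort(list):
--     sorted = False
--
--     while sorted == False:
--         sorted = True
--         i = 0
--
--         while i < len(list) - 1:
--             list.pop(i)
--             i += 1
--
--         for i in range(0, len(list) - 1):
--             if list[i] > list[i+1]:
--                 sorted = False
--
--     return list
-- ===== SOURCE B (Python) =====
-- def thanos_sort(list):
--     # Each "snap" keeps the elements at odd positions (and, for odd length,
--     # the final element), built in one O(n) pass instead of O(n) pops.
--     a = list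
--     while True:
--         out = [a[i] for i in range(1, len(a), 2)]
--         if len(a) % 2 == 1:
--             out.append(a[-1])
--         a = out
--         if all(a[i] <= a[i + 1] for i in range(len(a) - 1)):
--             list[:] = a
--             return list
-- ===== Notes on version B (the rewrite author's own statement) =====
-- stated objective: faster
-- what changed: Each pass builds the survivor list directly in one O(n) comprehension (odd indices, plus the last element for odd length) instead of A's repeated list.pop(i) calls that shift the tail on every pop; the sortedness test becomes a single all() scan.
import Mathlib
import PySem

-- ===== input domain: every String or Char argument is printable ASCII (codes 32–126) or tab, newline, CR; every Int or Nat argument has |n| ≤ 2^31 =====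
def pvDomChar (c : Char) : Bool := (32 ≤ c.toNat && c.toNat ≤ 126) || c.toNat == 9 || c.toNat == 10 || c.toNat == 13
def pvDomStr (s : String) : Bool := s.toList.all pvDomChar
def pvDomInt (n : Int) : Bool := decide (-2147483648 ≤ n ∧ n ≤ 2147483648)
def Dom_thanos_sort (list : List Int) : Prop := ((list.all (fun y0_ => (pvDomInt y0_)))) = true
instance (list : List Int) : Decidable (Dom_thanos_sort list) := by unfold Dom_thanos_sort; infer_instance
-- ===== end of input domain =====

-- ===== PORT A =====
-- B's objective: build each pass's survivor list in one O(n) comprehension instead of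
-- O(n) list.pop(i) calls; equivalence is about the return value (both A and B also
-- leave that final value in the argument list in Python).
-- A, transliterated. Both while-loops are ported with a fuel counter that only makes
-- the recursion structural; the fuel (length+1 inner, length+2 outer) exceeds the
-- number of iterations the Python loops perform, so it is never exhausted.
def popLoop (fuel : Nat) (l : List Int) (i : Nat) : List Int :=
  match fuel with
  | 0 => l
  | fuel + 1 =>
    -- while i < len(list) - 1: list.pop(i); i += 1   (pop at i is List.eraseIdx, exact for 0 ≤ i < len)
    if i < l.length - 1 then popLoop fuel (l.eraseIdx i) (i + 1) else l

-- for i in range(0, len(list) - 1): if list[i] > list[i+1]: sorted = False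
def checkSorted (l : List Int) : Bool :=
  (PySem.List.pyRange 0 ((l.length : Int) - 1) 1).foldl
    (fun s i => if PySem.List.pyGetD l i 0 > PySem.List.pyGetD l (i + 1) 0 then false else s) true

def thanosLoop (fuel : Nat) (l : List Int) : List Int :=
  match fuel with
  | 0 => l
  | fuel + 1 =>
    let l' := popLoop (l.length + 1) l 0
    if checkSorted l' then l' else thanosLoop fuel l'

def thanos_sort (list : List Int) : List Int := thanosLoop (list.length + 2) list

-- ===== PORT B =====
-- B, transliterated: one comprehension over range(1, len(a), 2) plus the last element
-- for odd length, and an all() sortedness check; the outer while gets the same fuel guard.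
def snap (a : List Int) : List Int :=
  let out := (PySem.List.pyRange 1 (a.length : Int) 2).map (fun i => PySem.List.pyGetD a i 0)
  if PySem.Int.mod (a.length : Int) 2 == 1 then out ++ [PySem.List.pyGetD a (-1) 0] else out

def allSorted (a : List Int) : Bool :=
  (PySem.List.pyRange 0 ((a.length : Int) - 1) 1).all
    (fun i => PySem.List.pyGetD a i 0 ≤ PySem.List.pyGetD a (i + 1) 0)

def snapLoop (fuel : Nat) (a : List Int) : List Int :=
  match fuel with
  | 0 => a
  | fuel + 1 =>
    let a' := snap a
    if allSorted a' then a' else snapLoop fuel a'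

def thanos_sort_alt (list : List Int) : List Int := snapLoop (list.length + 2) list

-- ===== PRECONDITION & SPEC =====
def Spec_thanos_sort (list : List Int) (out : List Int) : Prop := out = thanos_sort_alt list
instance (list : List Int) (out : List Int) : Decidable (Spec_thanos_sort list out) := by unfold Spec_thanos_sort; infer_instance

-- ===== CLAIM (what is proved, stated in full; the proofs are below) =====
def Claim_equal_thanos_sort : Prop := ∀ (list : List Int), Dom_thanos_sort list → Spec_thanos_sort list (thanos_sort list)

-- ===== LEMMAS AND PROOFS =====

-- the per-pass survivor list, recursively: drop the head of each remaining pair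
def gsnap : List Int → List Int
  | [] => []
  | [x] => [x]
  | _ :: y :: r => y :: gsnap r

theorem popLoop_eq (fuel : Nat) (l : List Int) (i : Nat) (hfuel : l.length ≤ fuel + i) :
    popLoop fuel l i = l.take i ++ gsnap (l.drop i) := by
  induction fuel generalizing l i with
  | zero =>
    have hd : l.drop i = [] := List.drop_eq_nil_of_le (by omega)
    simp [popLoop, hd, gsnap, List.take_of_length_le (by omega : l.length ≤ i)]
  | succ fuel ih =>
    rw [popLoop]
    by_cases h : i < l.length - 1
    · have hi1 : i + 1 < l.length := by omega
      have hi : i < l.length := by omega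
      rw [if_pos h, ih _ _ (by simp [List.length_eraseIdx, hi]; omega)]
      have hlt : (l.take i).length = i := by simp; omega
      rw [List.eraseIdx_eq_take_drop_succ, List.take_append, List.drop_append, hlt]
      rw [List.take_take, show min (i + 1) i = i from by omega,
          show i + 1 - i = 1 from by omega]
      rw [List.drop_eq_nil_of_le (by omega : (l.take i).length ≤ i + 1)]
      rw [List.drop_eq_getElem_cons hi1, List.drop_eq_getElem_cons hi,
          List.drop_eq_getElem_cons hi1]
      have ht : List.take 1 (List.drop (i + 1) l) = [l[i + 1]] := by
        rw [List.drop_eq_getElem_cons hi1, List.take_succ_cons, List.take_zero]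
      simp [gsnap, ht]
    · rw [if_neg h]
      have hlen : (l.drop i).length ≤ 1 := by simp; omega
      have hg : gsnap (l.drop i) = l.drop i := by
        rcases hd : l.drop i with _ | ⟨z, _ | ⟨w, r⟩⟩
        · rfl
        · rfl
        · rw [hd] at hlen; simp at hlen
      rw [hg, List.take_append_drop]

theorem pyRange_two_nil (a b : Int) (h : b ≤ a) : PySem.List.pyRange a b 2 = [] := by
  rw [PySem.List.pyRange_of_pos a b (by omega), if_neg (by omega)]
  rfl

theorem pyRange_two_cons (a b : Int) (h : a < b) :
    PySem.List.pyRange a b 2 = a :: PySem.List.pyRange (a + 2) b 2 := by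
  rw [PySem.List.pyRange_of_pos a b (by omega),
      PySem.List.pyRange_of_pos (a + 2) b (by omega), if_pos h]
  have hN : ((b - a + 2 - 1) / 2).toNat
      = (if a + 2 < b then ((b - (a + 2) + 2 - 1) / 2).toNat else 0) + 1 := by
    split <;> omega
  rw [hN, List.range_succ_eq_map]
  simp only [List.map_cons, List.map_map]
  refine List.cons_eq_cons.mpr ⟨by push_cast; ring, ?_⟩
  apply List.map_congr_left
  intro k _
  simp only [Function.comp]
  push_cast
  ring

theorem pyRange_two_shift (a b : Int) :
    PySem.List.pyRange (a + 2) (b + 2) 2 = (PySem.List.pyRange a b 2).map (· + 2) := by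
  rw [PySem.List.pyRange_of_pos a b (by omega),
      PySem.List.pyRange_of_pos (a + 2) (b + 2) (by omega)]
  have h2 : (if a + 2 < b + 2 then ((b + 2 - (a + 2) + 2 - 1) / 2).toNat else 0)
      = (if a < b then ((b - a + 2 - 1) / 2).toNat else 0) := by
    rcases lt_or_ge a b with h | h
    · rw [if_pos (by omega), if_pos h]; omega
    · rw [if_neg (by omega), if_neg (by omega)]
  rw [h2]
  simp only [List.map_map]
  apply List.map_congr_left
  intro k _
  simp only [Function.comp]
  push_cast
  ring

theorem snap_cons2 (x y : Int) (r : List Int) :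
    snap (x :: y :: r) = y :: snap r := by
  unfold snap
  have hlen : (((x :: y :: r).length : Nat) : Int) = (r.length : Int) + 2 := by
    simp; omega
  rw [hlen]
  have hmod : PySem.Int.mod ((r.length : Int) + 2) 2 = PySem.Int.mod (r.length : Int) 2 := by
    rw [PySem.Int.mod_eq_emod_of_pos (by omega), PySem.Int.mod_eq_emod_of_pos (by omega)]
    omega
  have hmap : (PySem.List.pyRange 1 ((r.length : Int) + 2) 2).map
        (fun i => PySem.List.pyGetD (x :: y :: r) i 0)
      = y :: (PySem.List.pyRange 1 (r.length : Int) 2).map (fun i => PySem.List.pyGetD r i 0) := by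
    rw [pyRange_two_cons 1 _ (by omega)]
    rw [show (1 : Int) + 2 = 1 + 2 from rfl]
    rw [show ((r.length : Int) + 2) = (r.length : Int) + 2 from rfl]
    rw [pyRange_two_shift 1 (r.length : Int)]
    simp only [List.map_cons, List.map_map]
    refine List.cons_eq_cons.mpr ⟨by simp [pysem], ?_⟩
    apply List.map_congr_left
    intro i hi
    have h1 : 1 ≤ i := ((PySem.List.mem_pyRange_iff_of_pos (by omega) i).mp hi).1
    simp only [Function.comp]
    rw [PySem.List.pyGetD_of_nonneg _ _ (by omega), PySem.List.pyGetD_of_nonneg _ _ (by omega)]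
    rw [show (i + 2).toNat = i.toNat + 1 + 1 from by omega]
    simp [List.getD_cons_succ]
  rw [hmod, hmap]
  by_cases hodd : PySem.Int.mod (r.length : Int) 2 == 1
  · rw [if_pos hodd, if_pos hodd]
    have hr : 1 ≤ r.length := by
      by_contra hc
      push Not at hc
      interval_cases h : r.length <;> simp_all [PySem.Int.mod]
    have hlast : PySem.List.pyGetD (x :: y :: r) (-1) 0 = PySem.List.pyGetD r (-1) 0 := by
      have e1 := PySem.List.pyGetD_neg_natCast (x :: y :: r) 1 0 (by omega) (by simp)
      have e2 := PySem.List.pyGetD_neg_natCast r 1 0 (by omega) (by omega)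
      norm_num at e1 e2
      rw [e1, e2, List.getElem_cons]
      rw [dif_neg (by omega)]
    rw [hlast]
    rfl
  · rw [if_neg (by simpa using hodd), if_neg (by simpa using hodd)]

theorem snap_eq_gsnap (a : List Int) : snap a = gsnap a := by
  induction a using gsnap.induct with
  | case1 => rfl
  | case2 x =>
    show snap [x] = [x]
    unfold snap
    norm_num [pyRange_two_nil 1 1 (by omega), PySem.Int.mod]
    rfl
  | case3 x y r ih =>
    rw [snap_cons2, ih]
    rfl

theorem check_eq_all (l : List Int) : checkSorted l = allSorted l := by
  unfold checkSorted allSorted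
  have hf : (fun (s : Bool) (i : Int) =>
        if PySem.List.pyGetD l i 0 > PySem.List.pyGetD l (i + 1) 0 then false else s)
      = (fun (s : Bool) (i : Int) =>
        if (fun j => decide (PySem.List.pyGetD l j 0 > PySem.List.pyGetD l (j + 1) 0)) i = true
        then false else s) := by
    funext s i
    simp
  rw [hf, PySem.List.foldl_if_false_eq]
  simp only [List.any_eq_not_all_not, Bool.true_and, Bool.not_not]
  have hg : (fun (x : Int) => !decide (PySem.List.pyGetD l (x + 1) 0 < PySem.List.pyGetD l x 0))
      = (fun (i : Int) => decide (PySem.List.pyGetD l i 0 ≤ PySem.List.pyGetD l (i + 1) 0)) := by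
    funext x
    by_cases hx : PySem.List.pyGetD l (x + 1) 0 < PySem.List.pyGetD l x 0
    · simp [hx, not_le.mpr hx]
    · simp [hx, not_lt.mp hx]
  rw [hg]

theorem loop_eq (fuel : Nat) (l : List Int) : thanosLoop fuel l = snapLoop fuel l := by
  induction fuel generalizing l with
  | zero => rfl
  | succ fuel ih =>
    have hs : popLoop (l.length + 1) l 0 = snap l := by
      rw [popLoop_eq _ _ _ (by omega), snap_eq_gsnap]
      simp
    rw [thanosLoop, snapLoop, hs, check_eq_all]
    by_cases h : allSorted (snap l)
    · rw [if_pos h, if_pos h]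
    · rw [if_neg h, if_neg h]
      exact ih (snap l)

-- ===== VERDICT (by name: the statement is the Claim_ definition above) =====
theorem thanos_sort_spec : Claim_equal_thanos_sort := by
  intro l _
  unfold Spec_thanos_sort thanos_sort thanos_sort_alt
  exact loop_eq (l.length + 2) l
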